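-- pv_equiv track=rewrite | github.com/Talador12/code-music | code_music/theory/serial.py | row_transforms
-- ===== SOURCE A (Python) =====
-- def row_transforms(row: list[int]) -> dict[str, list[int]]:
--     """Generate the four standard transforms of a 12-tone row.
--
--     Every serial composition uses these four forms — the prime (P),
--     retrograde (R), inversion (I), and retrograde-inversion (RI).
--     Webern built entire symphonies from just these four.
--
--     Args:
--         row: The prime row (list of 12 pitch classes).
--
--     Returns:
--         Dict with keys: 'prime', 'retrograde', 'inversion', 'retrograde_inversion'.
--     """
--     prime = list(row)
--     retrograde = list(reversed(row))
--     # Inversion: mirror intervals around the first note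
--     first = row[0]
--     inversion = [(first - (pc - first)) % 12 for pc in row]
--     retrograde_inversion = list(reversed(inversion))
--     return {
--         "prime": prime,
--         "retrograde": retrograde,
--         "inversion": inversion,
--         "retrograde_inversion": retrograde_inversion,
--     }
-- ===== SOURCE B (Python) =====
-- def row_transforms(row: list[int]) -> dict[str, list[int]]:
--     """Same four serial transforms, with the inversion built by a running
--     accumulation over consecutive intervals instead of a per-element formula."""
--     first = row[0]
--     acc = first % 12
--     inversion = [acc]
--     prev = first
--     for pc in row[1:]:
--         acc = (acc - (pc - prev)) % 12
--         prev = pc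
--         inversion.append(acc)
--     return {
--         "prime": list(row),
--         "retrograde": list(reversed(row)),
--         "inversion": inversion,
--         "retrograde_inversion": list(reversed(inversion)),
--     }
-- ===== Notes on version B (the rewrite author's own statement) =====
-- stated objective: alternative
-- what changed: The inversion is built by a single running accumulation over consecutive intervals (each entry = previous entry minus the interval to the next pitch class, mod 12) instead of evaluating the closed mirror formula (2*first - pc) mod 12 independently for each pitch class.
import Mathlib
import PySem

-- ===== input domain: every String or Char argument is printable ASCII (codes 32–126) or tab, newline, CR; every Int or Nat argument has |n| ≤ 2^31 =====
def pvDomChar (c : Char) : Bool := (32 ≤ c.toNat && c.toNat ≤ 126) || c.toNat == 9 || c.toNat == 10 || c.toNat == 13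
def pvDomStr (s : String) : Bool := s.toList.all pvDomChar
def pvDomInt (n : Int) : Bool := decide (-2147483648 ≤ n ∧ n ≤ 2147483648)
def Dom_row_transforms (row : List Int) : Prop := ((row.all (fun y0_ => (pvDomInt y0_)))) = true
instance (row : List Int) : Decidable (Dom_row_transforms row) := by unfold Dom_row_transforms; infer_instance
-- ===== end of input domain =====

-- B builds the inversion by a running accumulation over consecutive intervals
-- instead of A's per-element mirror formula (objective: alternative decomposition).
-- Pre_ excludes the empty row, on which both Pythons raise IndexError reading the first element.


-- ===== PORT A =====
def row_transforms (row : List Int) : List (String × List Int) :=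
  let prime := row
  let retrograde := row.reverse
  let first := (PySem.List.pyGet? row 0).getD 0   -- Python reads the first element here; none (IndexError) is excluded by Pre_
  let inversion := row.map (fun pc => PySem.Int.mod (first - (pc - first)) 12)
  let retrograde_inversion := inversion.reverse
  [("prime", prime), ("retrograde", retrograde),
   ("inversion", inversion), ("retrograde_inversion", retrograde_inversion)]

-- ===== PORT B =====
-- running-accumulation state: (acc, prev, inversion-so-far)
def row_transforms_alt (row : List Int) : List (String × List Int) :=
  let first := (PySem.List.pyGet? row 0).getD 0   -- Python reads the first element here; none (IndexError) is excluded by Pre_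
  let acc0 := PySem.Int.mod first 12
  let st := (row.drop 1).foldl
      (fun (s : Int × Int × List Int) pc =>
        let acc := PySem.Int.mod (s.1 - (pc - s.2.1)) 12
        (acc, pc, s.2.2 ++ [acc]))
      (acc0, first, [acc0])
  let inversion := st.2.2
  [("prime", row), ("retrograde", row.reverse),
   ("inversion", inversion), ("retrograde_inversion", inversion.reverse)]

-- ===== PRECONDITION & SPEC =====
-- Pre_ excludes exactly the empty row, on which A raises IndexError reading the first element.
def Pre_row_transforms (row : List Int) : Prop := row ≠ []
instance (row : List Int) : Decidable (Pre_row_transforms row) := by unfold Pre_row_transforms; infer_instance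
def pvWitness_row_transforms : List Int := [0, 11, 7, 4, 2, 9]

def Spec_row_transforms (row : List Int) (out : List (String × List Int)) : Prop := out = row_transforms_alt row
instance (row : List Int) (out : List (String × List Int)) : Decidable (Spec_row_transforms row out) := by unfold Spec_row_transforms; infer_instance

-- ===== CLAIM (what is proved, stated in full; the proofs are below) =====
def Claim_equal_row_transforms : Prop := ∀ (row : List Int), Dom_row_transforms row → Pre_row_transforms row → Spec_row_transforms row (row_transforms row)

-- ===== LEMMAS AND PROOFS =====

-- one step of the accumulation keeps the closed-form value
lemma acc_step (f prev pc : Int) :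
    ((f - (prev - f)) % 12 - (pc - prev)) % 12 = (f - (pc - f)) % 12 := by
  conv_lhs => rw [Int.sub_emod, Int.emod_emod_of_dvd _ (by norm_num : (12:Int) ∣ 12), ← Int.sub_emod]
  ring_nf

-- the fold, started from the closed-form state for `prev`, extends `out`
-- by the closed-form inversion of the remaining pitch classes
lemma inv_fold (f : Int) : ∀ (l : List Int) (prev : Int) (out : List Int),
    (l.foldl
      (fun (s : Int × Int × List Int) pc =>
        ((s.1 - (pc - s.2.1)) % 12, pc, s.2.2 ++ [(s.1 - (pc - s.2.1)) % 12]))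
      ((f - (prev - f)) % 12, prev, out)).2.2
    = out ++ l.map (fun pc => (f - (pc - f)) % 12) := by
  intro l
  induction l with
  | nil => intro prev out; simp
  | cons pc rest ih =>
    intro prev out
    simp only [List.foldl_cons]
    rw [show ((f - (prev - f)) % 12 - (pc - prev)) % 12 = (f - (pc - f)) % 12 from acc_step f prev pc]
    rw [ih pc (out ++ [(f - (pc - f)) % 12])]
    simp

-- ===== VERDICT (by name: the statement is the Claim_ definition above) =====
theorem row_transforms_spec : Claim_equal_row_transforms := by
  intro row _ hpre
  unfold Spec_row_transforms row_transforms row_transforms_alt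
  cases row with
  | nil => exact absurd rfl hpre
  | cons r0 rest =>
    simp only [PySem.List.pyGet?, PySem.List.pyIdx?, List.drop_one, List.tail_cons]
    norm_num
    rw [show (r0:Int) % 12 = (r0 - (r0 - r0)) % 12 by ring_nf]
    rw [inv_fold r0 rest r0 [(r0 - (r0 - r0)) % 12]]
    simp
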